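-- pv_equiv track=rewrite | github.com/Scropio-star/Local | tableau.py | branch_closed
-- ===== SOURCE A (Python) =====
-- def branch_closed(branch):
--     for f in branch['formula_set']:
--         if f.startswith('~'):
--             if f[1:] in branch['formula_set']:
--                 return True
--         else:
--             if ('~' + f) in branch['formula_set']:
--                 return True
--     return False
-- ===== SOURCE B (Python) =====
-- def branch_closed(branch):
--     # One pass builds a polarity table: for each body string k, whether k itself
--     # was seen (pos) and whether '~'+k was seen (neg); closed iff some body has both.
--     seen = {}
--     for f in branch['formula_set']:
--         pos, neg = seen.get(f, (False, False))
--         seen[f] = (True, neg)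
--         if f.startswith('~'):
--             g = f[1:]
--             pos2, neg2 = seen.get(g, (False, False))
--             seen[g] = (pos2, True)
--     return any(pos and neg for pos, neg in seen.values())
-- ===== Notes on version B (the rewrite author's own statement) =====
-- stated objective: alternative
-- what changed: B never tests membership of a complement in the collection: one pass builds a polarity table mapping each formula body to a (seen-positively, seen-negated) flag pair, then a scan of the table's values looks for a key with both flags set; A instead tests, formula by formula, whether that formula's complement string is a member of the whole collection.
import Mathlib
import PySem

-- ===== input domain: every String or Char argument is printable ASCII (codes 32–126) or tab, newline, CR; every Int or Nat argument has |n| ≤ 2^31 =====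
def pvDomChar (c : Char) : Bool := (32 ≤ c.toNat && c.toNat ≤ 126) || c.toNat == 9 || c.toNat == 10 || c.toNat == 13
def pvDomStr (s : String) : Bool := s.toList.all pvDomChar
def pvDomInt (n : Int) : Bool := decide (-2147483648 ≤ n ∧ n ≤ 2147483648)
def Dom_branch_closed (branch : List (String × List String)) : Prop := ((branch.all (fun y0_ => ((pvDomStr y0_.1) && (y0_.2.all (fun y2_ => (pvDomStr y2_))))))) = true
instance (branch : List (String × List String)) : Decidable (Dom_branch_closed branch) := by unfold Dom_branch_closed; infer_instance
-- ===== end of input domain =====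

-- B replaces A's per-formula complement-membership loop by a one-pass polarity table
-- (body ↦ (seen-positively, seen-negated)) scanned once for a doubly-flagged body; alternative, same result.

-- ===== PORT A =====
def branchClosedLoop (fs full : List String) : Bool :=
  match fs with
  | [] => false
  | f :: rest =>
    if PySem.Str.startswith f "~" then
      if full.contains (PySem.Str.slice f (some 1) none) then true
      else branchClosedLoop rest full
    else
      if full.contains ("~" ++ f) then true
      else branchClosedLoop rest full

def branch_closed (branch : List (String × List String)) : Bool :=
  match PySem.Dict.get? ⟨branch⟩ "formula_set" with
  | some fs => branchClosedLoop fs fs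
  | none => false

-- ===== PORT B =====
-- one loop iteration: mark f as seen-positively, and (if f = '~'+g) mark g as seen-negated
def pvStep (d : PySem.Dict String (Bool × Bool)) (f : String) : PySem.Dict String (Bool × Bool) :=
  let pn := d.getD f (false, false)
  let d1 := d.insert f (true, pn.2)
  if PySem.Str.startswith f "~" then
    let g := PySem.Str.slice f (some 1) none
    let pn2 := d1.getD g (false, false)
    d1.insert g (pn2.1, true)
  else d1

def branch_closed_alt (branch : List (String × List String)) : Bool :=
  match PySem.Dict.get? ⟨branch⟩ "formula_set" with
  | some fs => ((fs.foldl pvStep PySem.Dict.empty).values).any (fun pn => pn.1 && pn.2)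
  | none => false

-- ===== PRECONDITION & SPEC =====
-- Pre_ excludes only the inputs where the dict has no 'formula_set' key: there Python A raises KeyError (B raises too).
def Pre_branch_closed (branch : List (String × List String)) : Prop :=
  (PySem.Dict.get? ⟨branch⟩ "formula_set" : Option (List String)).isSome = true
instance (branch : List (String × List String)) : Decidable (Pre_branch_closed branch) := by
  unfold Pre_branch_closed; infer_instance
def pvWitness_branch_closed : (List (String × List String)) := [("formula_set", ["p", "~p"])]

def Spec_branch_closed (branch : List (String × List String)) (out : Bool) : Prop := out = branch_closed_alt branch
instance (branch : List (String × List String)) (out : Bool) : Decidable (Spec_branch_closed branch out) := by unfold Spec_branch_closed; infer_instance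

-- ===== CLAIM (what is proved, stated in full; the proofs are below) =====
def Claim_equal_branch_closed : Prop := ∀ (branch : List (String × List String)), Dom_branch_closed branch → Pre_branch_closed branch → Spec_branch_closed branch (branch_closed branch)

-- ===== LEMMAS AND PROOFS =====

theorem pvTilde_decomp (f : String) (h : PySem.Str.startswith f "~" = true) :
    f = "~" ++ PySem.Str.slice f (some 1) none := by
  apply String.toList_inj.mp
  have h' : "~".toList <+: f.toList := by
    rw [PySem.Str.startswith_eq] at h
    exact (PySem.Chars.startswith_iff _ _).mp h
  simp at h'
  obtain ⟨t, ht⟩ := h'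
  have hs := PySem.Str.toList_slice f (some 1) none
  simp [String.toList_append, hs, PySem.Chars.slice_eq_listSlice,
    PySem.List.slice_from_one, ← ht]

theorem pvNot_tilde (f k : String) (h : PySem.Str.startswith f "~" = false) :
    "~" ++ k ≠ f := by
  intro he
  rw [PySem.Str.startswith_eq, ← he] at h
  have : PySem.Chars.startswith ("~" ++ k).toList "~".toList = true :=
    (PySem.Chars.startswith_iff _ _).mpr (by simp)
  rw [this] at h; simp at h

theorem pvTilde_ne (s : String) : "~" ++ s ≠ s := by
  intro h
  have := congrArg (fun x => x.toList.length) h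
  simp at this

theorem pvTilde_inj (a b : String) (h : "~" ++ a = "~" ++ b) : a = b := by
  apply String.toList_inj.mp
  have := congrArg String.toList h
  simpa using this

-- the intended value of the table at key k after processing acc
def pvFlag (acc : List String) (k : String) : Bool × Bool :=
  (decide (k ∈ acc), decide (("~" ++ k) ∈ acc))

theorem pvStep_getD (d : PySem.Dict String (Bool × Bool)) (acc : List String) (f : String)
    (hd : ∀ k, d.getD k (false, false) = pvFlag acc k) (k : String) :
    (pvStep d f).getD k (false, false) = pvFlag (acc ++ [f]) k := by
  unfold pvStep
  cases hs : PySem.Str.startswith f "~" with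
  | true =>
    simp only [if_true]
    have hfd : f = "~" ++ PySem.Str.slice f (some 1) none := pvTilde_decomp f hs
    set g := PySem.Str.slice f (some 1) none with hg
    have hgf : g ≠ f := fun he => pvTilde_ne g (by rw [← he] at hfd; exact hfd.symm)
    simp only [PySem.Dict.getD_insert]
    by_cases hkg : k = g
    · subst hkg
      rw [if_pos rfl, if_neg hgf, hd]
      simp [pvFlag, hgf, hfd.symm]
    · rw [if_neg hkg]
      by_cases hkf : k = f
      · subst hkf
        rw [if_pos rfl, hd]
        simp [pvFlag, pvTilde_ne k]
      · have h2 : ("~" ++ k) ≠ f := fun he => hkg (pvTilde_inj k g (he.trans hfd))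
        rw [if_neg hkf, hd]
        simp [pvFlag, hkf, h2]
  | false =>
    simp only [Bool.false_eq_true, if_false]
    simp only [PySem.Dict.getD_insert]
    by_cases hkf : k = f
    · subst hkf
      rw [if_pos rfl, hd]
      simp [pvFlag, pvNot_tilde k k hs]
    · rw [if_neg hkf, hd]
      simp [pvFlag, hkf, pvNot_tilde f k hs]

theorem pvFold_getD (l : List String) : ∀ (d : PySem.Dict String (Bool × Bool)) (acc : List String),
    (∀ k, d.getD k (false, false) = pvFlag acc k) →
    ∀ k, (l.foldl pvStep d).getD k (false, false) = pvFlag (acc ++ l) k := by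
  induction l with
  | nil => intro d acc hd k; simpa using hd k
  | cons f t ih =>
    intro d acc hd k
    simp only [List.foldl_cons]
    have := ih (pvStep d f) (acc ++ [f]) (pvStep_getD d acc f hd) k
    simpa using this

theorem pvStep_nodup (d : PySem.Dict String (Bool × Bool)) (f : String)
    (h : d.keys.Nodup) : (pvStep d f).keys.Nodup := by
  unfold pvStep
  split
  · exact PySem.Dict.nodup_keys_insert _ _ _ (PySem.Dict.nodup_keys_insert _ _ _ h)
  · exact PySem.Dict.nodup_keys_insert _ _ _ h

theorem pvFold_nodup (l : List String) : ∀ (d : PySem.Dict String (Bool × Bool)),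
    d.keys.Nodup → (l.foldl pvStep d).keys.Nodup := by
  induction l with
  | nil => intro d h; simpa using h
  | cons f t ih => intro d h; exact ih _ (pvStep_nodup d f h)

-- B on a formula list: true iff some body occurs both plain and negated
theorem pvAlt_char (fs : List String) :
    (((fs.foldl pvStep PySem.Dict.empty).values).any (fun pn => pn.1 && pn.2) = true)
      ↔ ∃ k, k ∈ fs ∧ ("~" ++ k) ∈ fs := by
  set d := fs.foldl pvStep PySem.Dict.empty with hd
  have hget : ∀ k, d.getD k (false, false) = pvFlag fs k := by
    intro k
    have := pvFold_getD fs PySem.Dict.empty []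
      (by intro k; simp [PySem.Dict.getD_empty, pvFlag]) k
    simpa using this
  have hnd : d.keys.Nodup := pvFold_nodup fs PySem.Dict.empty (by simp)
  rw [PySem.Dict.values_eq_map_keys d hnd (false, false)]
  simp only [List.any_map, List.any_eq_true, Function.comp]
  constructor
  · rintro ⟨k, hk, hpn⟩
    rw [hget k] at hpn
    unfold pvFlag at hpn
    simp at hpn
    exact ⟨k, hpn⟩
  · rintro ⟨k, hk1, hk2⟩
    refine ⟨k, ?_, ?_⟩
    · have hcont : d.contains k = true := by
        cases hc : d.contains k with
        | true => rfl
        | false =>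
          have := PySem.Dict.getD_of_not_contains d (false, false) hc
          rw [hget k] at this
          unfold pvFlag at this
          simp [hk1] at this
      exact (PySem.Dict.contains_iff_mem_keys d k).mp hcont
    · rw [hget k]; unfold pvFlag; simp [hk1, hk2]

def pvComplement (f : String) : String :=
  if PySem.Str.startswith f "~" then PySem.Str.slice f (some 1) none else "~" ++ f

theorem pvLoop_eq (fs full : List String) :
    branchClosedLoop fs full = fs.any (fun f => full.contains (pvComplement f)) := by
  induction fs with
  | nil => rfl
  | cons f rest ih =>
    simp only [branchClosedLoop, pvComplement, List.any_cons]
    split_ifs <;> simp_all [pvComplement]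

-- A's loop: true iff some formula's complement is also present
theorem pvLoop_char (fs : List String) :
    (branchClosedLoop fs fs = true) ↔ ∃ k, k ∈ fs ∧ ("~" ++ k) ∈ fs := by
  rw [pvLoop_eq]
  simp only [List.any_eq_true]
  constructor
  · rintro ⟨f, hf, hc⟩
    have hc' : pvComplement f ∈ fs := by simpa using hc
    unfold pvComplement at hc'
    cases hs : PySem.Str.startswith f "~" with
    | true =>
      rw [if_pos hs] at hc'
      exact ⟨PySem.Str.slice f (some 1) none, hc', by rw [← pvTilde_decomp f hs]; exact hf⟩
    | false =>
      rw [hs] at hc'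
      simp only [Bool.false_eq_true, if_false] at hc'
      exact ⟨f, hf, hc'⟩
  · rintro ⟨k, hk1, hk2⟩
    refine ⟨"~" ++ k, hk2, ?_⟩
    have hs : PySem.Str.startswith ("~" ++ k) "~" = true := by
      rw [PySem.Str.startswith_eq]
      exact (PySem.Chars.startswith_iff _ _).mpr (by simp)
    have : pvComplement ("~" ++ k) = k := by
      unfold pvComplement
      rw [if_pos hs]
      exact (pvTilde_inj _ _ (pvTilde_decomp _ hs).symm)
    rw [this]
    simpa using hk1

-- ===== VERDICT (by name: the statement is the Claim_ definition above) =====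
theorem branch_closed_spec : Claim_equal_branch_closed := by
  intro branch _ _
  unfold Spec_branch_closed branch_closed branch_closed_alt
  cases h : (PySem.Dict.get? ⟨branch⟩ "formula_set" : Option (List String)) with
  | none => rfl
  | some fs =>
    show branchClosedLoop fs fs
      = ((fs.foldl pvStep PySem.Dict.empty).values).any (fun pn => pn.1 && pn.2)
    exact Bool.eq_iff_iff.mpr ((pvLoop_char fs).trans (pvAlt_char fs).symm)
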